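-- pv_equiv track=rewrite | github.com/troisdiz/mypersonalwiki | src/gitwiki/breadcrumbrenderer.py | build_tuples
-- ===== SOURCE A (Python) =====
-- from typing import Generator
--
-- def build_tuples(path_list: list[str]) -> Generator:
--     current_path = []
--     path_list_len: int = len(path_list)
--     yield current_path, 'Home', True
--     for idx, path_item in enumerate(path_list):
--         current_path = list(current_path + [path_item])
--         # The last item is always a file, so it is not a folder
--         is_folder: bool = (idx != path_list_len-1)
--         yield current_path, path_item, is_folder
-- ===== SOURCE B (Python) =====
-- def build_tuples(path_list):
--     yield [], 'Home', True
--     last = len(path_list) - 1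
--     for idx, path_item in enumerate(path_list):
--         yield path_list[:idx + 1], path_item, idx != last
-- ===== Notes on version B (the rewrite author's own statement) =====
-- stated objective: simpler
-- what changed: B drops the running accumulator list that A grows step by step and instead computes each breadcrumb prefix directly as a fresh slice path_list[:idx+1], yielding it stateless-ly.
import Mathlib
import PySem

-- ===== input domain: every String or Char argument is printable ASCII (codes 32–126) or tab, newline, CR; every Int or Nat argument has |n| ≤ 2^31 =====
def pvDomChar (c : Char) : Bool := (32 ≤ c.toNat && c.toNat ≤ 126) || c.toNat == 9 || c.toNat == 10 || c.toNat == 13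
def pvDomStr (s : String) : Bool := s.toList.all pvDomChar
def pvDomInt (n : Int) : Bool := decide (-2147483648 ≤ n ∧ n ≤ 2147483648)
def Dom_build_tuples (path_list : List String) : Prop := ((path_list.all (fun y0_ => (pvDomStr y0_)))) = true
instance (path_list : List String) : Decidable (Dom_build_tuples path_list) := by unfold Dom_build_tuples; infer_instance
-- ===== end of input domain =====

-- B replaces A's running accumulator with a direct fresh slice path_list[:idx+1] per item (simpler, stateless loop body).

-- ===== PORT A =====
-- A's for-loop threading the growing 'current_path' accumulator, step for step.
def build_tuples_loop (n : Nat) (items : List (Int × String)) (cur : List String) :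
    List (List String × String × Bool) :=
  match items with
  | [] => []
  | (idx, path_item) :: rest =>
    let cur' := cur ++ [path_item]
    (cur', path_item, decide (idx ≠ (n : Int) - 1)) :: build_tuples_loop n rest cur'

def build_tuples (path_list : List String) : List (List String × String × Bool) :=
  let path_list_len : Nat := path_list.length
  ([], "Home", true) :: build_tuples_loop path_list_len (PySem.List.enumerate path_list 0) []

-- ===== PORT B =====
def build_tuples_alt (path_list : List String) : List (List String × String × Bool) :=
  let last : Int := (path_list.length : Int) - 1
  ([], "Home", true) ::
    (PySem.List.enumerate path_list 0).map
      (fun p => (PySem.List.slice path_list none (some (p.1 + 1)), p.2, decide (p.1 ≠ last)))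

-- ===== PRECONDITION & SPEC =====
def Spec_build_tuples (path_list : List String) (out : List (List String × String × Bool)) : Prop := out = build_tuples_alt path_list
instance (path_list : List String) (out : List (List String × String × Bool)) : Decidable (Spec_build_tuples path_list out) := by unfold Spec_build_tuples; infer_instance

-- ===== CLAIM (what is proved, stated in full; the proofs are below) =====
def Claim_equal_build_tuples : Prop := ∀ (path_list : List String), Dom_build_tuples path_list → Spec_build_tuples path_list (build_tuples path_list)

-- ===== LEMMAS AND PROOFS =====

-- loop invariant: with cur = the prefix 'pre' already consumed, A's loop produces exactly
-- B's slices, because pre ++ [x] = take (pre.length + 1) of the whole list.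
theorem build_tuples_loop_eq_map (n : Nat) (pl : List String) :
    ∀ (xs pre : List String), pl = pre ++ xs →
      build_tuples_loop n (PySem.List.enumerate xs (pre.length : Int)) pre
        = (PySem.List.enumerate xs (pre.length : Int)).map
            (fun p => (PySem.List.slice pl none (some (p.1 + 1)), p.2, decide (p.1 ≠ (n : Int) - 1))) := by
  intro xs
  induction xs with
  | nil => intro pre h; simp [PySem.List.enumerate_nil, build_tuples_loop]
  | cons x rest ih =>
    intro pre h
    rw [PySem.List.enumerate_cons]
    simp only [build_tuples_loop, List.map_cons]
    have hslice : PySem.List.slice pl none (some ((pre.length : Int) + 1)) = pre ++ [x] := by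
        have : ((pre.length : Int) + 1) = ((pre.length + 1 : Nat) : Int) := by push_cast; ring
        rw [this, PySem.List.slice_to_natCast, h, List.take_append]
        simp
    have hlen : ((pre.length : Int) + 1) = (((pre ++ [x]).length : Nat) : Int) := by
        push_cast; simp
    rw [hslice]
    congr 1
    rw [hlen]
    exact ih (pre ++ [x]) (by simp [h])

-- ===== VERDICT (by name: the statement is the Claim_ definition above) =====
theorem build_tuples_spec : Claim_equal_build_tuples := by
  intro path_list _
  unfold Spec_build_tuples build_tuples build_tuples_alt
  simp only []
  have := build_tuples_loop_eq_map path_list.length path_list path_list [] (by simp)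
  simp only [List.length_nil, Int.natCast_zero] at this
  rw [this]
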